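-- pv_equiv track=rewrite | github.com/candidagenome/cgd-backend | cgd/api/services/webprimer_service.py | _calculate_annealing
-- ===== SOURCE A (Python) =====
-- def _calculate_annealing(seq1: str, seq2: str) -> int:
--     """
--     Calculate annealing score between two sequences.
--
--     Scores: G-C = 4, A-T = 2, mismatch = 0
--     Returns maximum contiguous annealing score.
--     """
--     seq1 = seq1.upper()
--     seq2 = seq2.upper()
--
--     # Pad shorter sequence
--     len_diff = len(seq1) - len(seq2)
--     if len_diff < 0:
--         seq1 = "N" * abs(len_diff) + seq1
--     elif len_diff > 0:
--         seq2 = "N" * len_diff + seq2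
--
--     max_score = 0
--
--     # Slide seq2 along seq1
--     for offset in range(len(seq2)):
--         current_score = 0
--         temp_score = 0
--
--         for i in range(len(seq2) - offset):
--             b1 = seq1[i]
--             b2 = seq2[len(seq2) - 1 - i - offset]
--
--             # Check for complementary base pairing
--             if (b1 == "G" and b2 == "C") or (b1 == "C" and b2 == "G"):
--                 temp_score += 4
--             elif (b1 == "A" and b2 == "T") or (b1 == "T" and b2 == "A"):
--                 temp_score += 2
--             else:
--                 if temp_score > current_score:
--                     current_score = temp_score
--                 temp_score = 0
--
--         if temp_score > current_score:
--             current_score = temp_score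
--         if current_score > max_score:
--             max_score = current_score
--
--     return max_score
-- ===== SOURCE B (Python) =====
-- def _pair_score(b1: str, b2: str) -> int:
--     if (b1 == "G" and b2 == "C") or (b1 == "C" and b2 == "G"):
--         return 4
--     if (b1 == "A" and b2 == "T") or (b1 == "T" and b2 == "A"):
--         return 2
--     return 0
--
--
-- def _calculate_annealing(seq1: str, seq2: str) -> int:
--     s1 = seq1.upper()
--     s2 = seq2.upper()
--     if len(s1) < len(s2):
--         s1 = "N" * (len(s2) - len(s1)) + s1
--     elif len(s1) > len(s2):
--         s2 = "N" * (len(s1) - len(s2)) + s2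
--     n = len(s2)
--     # Dynamic programming over rows i of the (i, j) pairing grid (j indexes s2 directly):
--     # a run of consecutive complementary pairs advances (i, j) -> (i+1, j-1), so the sum of
--     # the run ending at cell (i, j) is prev[j+1] + score(i, j) when score(i, j) > 0, else 0.
--     # The answer is the maximum cell value over the triangle i + j <= n - 1.
--     best = 0
--     prev = []  # prev[j] = run sum ending at (i-1, j); missing entries are 0
--     for i in range(n):
--         cur = []
--         for j in range(n - i):
--             s = _pair_score(s1[i], s2[j])
--             v = s + (prev[j + 1] if j + 1 < len(prev) else 0) if s else 0
--             cur.append(v)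
--             if v > best:
--                 best = v
--         prev = cur
--     return best
-- ===== Notes on version B (the rewrite author's own statement) =====
-- stated objective: alternative
-- what changed: B replaces A's per-offset diagonal slide with two Kadane accumulators by a row-wise dynamic program over the (i,j) pairing grid: it carries across rows an array prev[j] = sum of the complementary run ending at cell (i-1,j) (a run advances (i,j)->(i+1,j-1)), updates cur[j] = score + prev[j+1] when the pair is complementary, and returns the maximum cell value over the triangle i+j<=n-1.
import Mathlib
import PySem

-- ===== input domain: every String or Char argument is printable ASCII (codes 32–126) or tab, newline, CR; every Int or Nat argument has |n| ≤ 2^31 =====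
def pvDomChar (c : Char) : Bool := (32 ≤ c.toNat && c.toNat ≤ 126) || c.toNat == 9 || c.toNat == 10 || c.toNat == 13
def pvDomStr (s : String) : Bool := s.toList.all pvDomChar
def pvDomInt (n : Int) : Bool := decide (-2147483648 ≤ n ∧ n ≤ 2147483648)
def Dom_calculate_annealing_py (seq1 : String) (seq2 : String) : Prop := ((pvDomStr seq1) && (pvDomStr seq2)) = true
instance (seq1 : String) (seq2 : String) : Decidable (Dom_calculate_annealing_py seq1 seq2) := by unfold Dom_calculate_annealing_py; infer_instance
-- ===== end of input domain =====

-- B replaces A's per-offset diagonal slide (two Kadane accumulators) by a row-wise dynamic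
-- program over the pairing grid that carries run-sums-ending-at-cell across rows;
-- objective: alternative algorithm, same cost.


-- ===== PORT A =====
-- inner loop of A: Kadane-style scan along one diagonal with (current_score, temp_score).
-- s1[i] / s2[n-1-i-offset] are always in range in A (i < n - offset ≤ n = length), so getD is exact.
def innerLoopA (s1 s2 : List Char) (n offset : Nat) : Int :=
  let st := (List.range (n - offset)).foldl (fun (st : Int × Int) i =>
      let b1 := s1.getD i 'N'
      let b2 := s2.getD (n - 1 - i - offset) 'N'
      if (b1 = 'G' ∧ b2 = 'C') ∨ (b1 = 'C' ∧ b2 = 'G') then (st.1, st.2 + 4)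
      else if (b1 = 'A' ∧ b2 = 'T') ∨ (b1 = 'T' ∧ b2 = 'A') then (st.1, st.2 + 2)
      else (if st.2 > st.1 then st.2 else st.1, 0)) ((0 : Int), (0 : Int))
  if st.2 > st.1 then st.2 else st.1

def calculate_annealing_py (seq1 : String) (seq2 : String) : Int :=
  let s1 := PySem.Chars.upper seq1.toList
  let s2 := PySem.Chars.upper seq2.toList
  let lenDiff : Int := (s1.length : Int) - (s2.length : Int)
  let s1 := if lenDiff < 0 then List.replicate lenDiff.natAbs 'N' ++ s1 else s1
  let s2 := if 0 < lenDiff then List.replicate lenDiff.natAbs 'N' ++ s2 else s2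
  (List.range s2.length).foldl (fun maxScore offset =>
    let cur := innerLoopA s1 s2 s2.length offset
    if cur > maxScore then cur else maxScore) 0

-- ===== PORT B =====
def pairScoreB (b1 b2 : Char) : Int :=
  if (b1 = 'G' ∧ b2 = 'C') ∨ (b1 = 'C' ∧ b2 = 'G') then 4
  else if (b1 = 'A' ∧ b2 = 'T') ∨ (b1 = 'T' ∧ b2 = 'A') then 2
  else 0

-- row-wise DP: state (best, prev) where prev[j] = run sum ending at (i-1, j);
-- s1[i] / s2[j] are always in range (i < n, j < n - i ≤ n), so getD is exact.
def calculate_annealing_py_alt (seq1 : String) (seq2 : String) : Int :=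
  let s1 := PySem.Chars.upper seq1.toList
  let s2 := PySem.Chars.upper seq2.toList
  let s1 := if s1.length < s2.length then List.replicate (s2.length - s1.length) 'N' ++ s1 else s1
  let s2 := if s2.length < s1.length then List.replicate (s1.length - s2.length) 'N' ++ s2 else s2
  let n := s2.length
  ((List.range n).foldl (fun (st : Int × List Int) i =>
      (List.range (n - i)).foldl (fun (st2 : Int × List Int) j =>
          let s := pairScoreB (s1.getD i 'N') (s2.getD j 'N')
          let v := if s = 0 then 0 else s + (if j + 1 < st.2.length then st.2.getD (j + 1) 0 else 0)
          (if v > st2.1 then v else st2.1, st2.2 ++ [v])) (st.1, ([] : List Int)))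
    ((0 : Int), ([] : List Int))).1

-- ===== PRECONDITION & SPEC =====
def Spec_calculate_annealing_py (seq1 : String) (seq2 : String) (out : Int) : Prop := out = calculate_annealing_py_alt seq1 seq2
instance (seq1 : String) (seq2 : String) (out : Int) : Decidable (Spec_calculate_annealing_py seq1 seq2 out) := by unfold Spec_calculate_annealing_py; infer_instance

-- ===== CLAIM (what is proved, stated in full; the proofs are below) =====
def Claim_equal_calculate_annealing_py : Prop := ∀ (seq1 : String) (seq2 : String), Dom_calculate_annealing_py seq1 seq2 → Spec_calculate_annealing_py seq1 seq2 (calculate_annealing_py seq1 seq2)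

-- ===== LEMMAS AND PROOFS =====

-- run sum ending at cell (i, j): a run advances (i, j) -> (i+1, j-1)
def runEnd (s1 s2 : List Char) : Nat → Nat → Int
  | 0, j => let s := pairScoreB (s1.getD 0 'N') (s2.getD j 'N'); if s = 0 then 0 else s
  | (i+1), j => let s := pairScoreB (s1.getD (i+1) 'N') (s2.getD j 'N');
      if s = 0 then 0 else s + runEnd s1 s2 i (j + 1)

lemma pairScore_cases (b1 b2 : Char) : pairScoreB b1 b2 = 0 ∨ pairScoreB b1 b2 = 2 ∨ pairScoreB b1 b2 = 4 := by
  simp only [pairScoreB]; split_ifs <;> simp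

-- A's inner step expressed on the score value instead of the character pair
def stepA (st : Int × Int) (s : Int) : Int × Int :=
  if s = 4 then (st.1, st.2 + 4)
  else if s = 2 then (st.1, st.2 + 2)
  else (if st.2 > st.1 then st.2 else st.1, 0)

lemma step_char (st : Int × Int) (b1 b2 : Char) :
    (if (b1 = 'G' ∧ b2 = 'C') ∨ (b1 = 'C' ∧ b2 = 'G') then (st.1, st.2 + 4)
     else if (b1 = 'A' ∧ b2 = 'T') ∨ (b1 = 'T' ∧ b2 = 'A') then (st.1, st.2 + 2)
     else (if st.2 > st.1 then st.2 else st.1, 0))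
    = stepA st (pairScoreB b1 b2) := by
  simp only [pairScoreB, stepA]
  split_ifs <;> simp_all

def kadRuns : Int → List Int → Int
  | temp, [] => temp
  | temp, x :: xs => if 0 < x then kadRuns (temp + x) xs else max temp (kadRuns 0 xs)

lemma fold_stepA (l : List Int) (hl : ∀ x ∈ l, x = 0 ∨ x = 2 ∨ x = 4) :
    ∀ cur temp : Int,
      (let st := l.foldl stepA (cur, temp); if st.2 > st.1 then st.2 else st.1)
      = max cur (kadRuns temp l) := by
  induction l with
  | nil => intro cur temp; simp [kadRuns]; split_ifs <;> omega
  | cons x xs ih =>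
    intro cur temp
    have hx := hl x (List.mem_cons_self ..)
    have hxs : ∀ y ∈ xs, y = 0 ∨ y = 2 ∨ y = 4 := fun y hy => hl y (List.mem_cons_of_mem _ hy)
    rcases hx with hx | hx | hx <;> subst hx
    · simp only [List.foldl_cons]
      have hs : stepA (cur, temp) 0 = (if temp > cur then temp else cur, 0) := by simp [stepA]
      rw [hs, ih hxs, kadRuns]
      simp only [if_neg (by omega : ¬ (0:Int) < 0)]
      split_ifs <;> omega
    · simp only [List.foldl_cons]
      have hs : stepA (cur, temp) 2 = (cur, temp + 2) := by simp [stepA]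
      rw [hs, ih hxs, kadRuns]
      simp only [if_pos (by omega : (0:Int) < 2)]
    · simp only [List.foldl_cons]
      have hs : stepA (cur, temp) 4 = (cur, temp + 4) := by simp [stepA]
      rw [hs, ih hxs, kadRuns]
      simp only [if_pos (by omega : (0:Int) < 4)]

-- run-ending values of a score list, left to right
def reVals : Int → List Int → List Int
  | _, [] => []
  | temp, x :: xs => let v := if 0 < x then temp + x else 0; v :: reVals v xs

lemma le_foldl_max : ∀ (l : List Int) (a : Int), a ≤ l.foldl max a := by
  intro l
  induction l with
  | nil => intro a; simp
  | cons x xs ih => intro a; simpa using le_trans (le_max_left a x) (ih (max a x))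

lemma foldl_max_shift : ∀ (l : List Int) (a : Int), 0 ≤ a → l.foldl max a = max a (l.foldl max 0) := by
  intro l
  induction l with
  | nil => intro a ha; simp; omega
  | cons x xs ih =>
    intro a ha
    have h0 := le_foldl_max xs 0
    simp only [List.foldl_cons]
    rw [ih (max a x) (by omega), ih (max 0 x) (by omega)]
    omega

lemma kadRuns_re : ∀ (l : List Int), (∀ x ∈ l, 0 ≤ x) → ∀ temp : Int, 0 ≤ temp →
    kadRuns temp l = max temp ((reVals temp l).foldl max 0) := by
  intro l
  induction l with
  | nil => intro _ temp ht; simp [kadRuns, reVals]; omega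
  | cons x xs ih =>
    intro hl temp ht
    have hx : (0:Int) ≤ x := hl x (List.mem_cons_self ..)
    have hxs : ∀ y ∈ xs, (0:Int) ≤ y := fun y hy => hl y (List.mem_cons_of_mem _ hy)
    by_cases h : (0:Int) < x
    · rw [kadRuns]
      simp only [if_pos h]
      rw [ih hxs (temp + x) (by omega)]
      show _ = max temp ((reVals temp (x :: xs)).foldl max 0)
      rw [reVals]
      simp only [if_pos h, List.foldl_cons]
      rw [foldl_max_shift _ (max 0 (temp + x)) (by omega)]
      have := le_foldl_max (reVals (temp + x) xs) 0
      omega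
    · rw [kadRuns]
      simp only [if_neg h]
      rw [ih hxs 0 le_rfl]
      show _ = max temp ((reVals temp (x :: xs)).foldl max 0)
      rw [reVals]
      simp only [if_neg h, List.foldl_cons]
      rw [foldl_max_shift _ (max 0 0) (by omega)]
      have := le_foldl_max (reVals 0 xs) 0
      omega

-- the score list of the diagonal for a given offset
def diagScores (s1 s2 : List Char) (n offset : Nat) : List Int :=
  (List.range (n - offset)).map (fun i => pairScoreB (s1.getD i 'N') (s2.getD (n - 1 - i - offset) 'N'))

lemma inner_re (s1 s2 : List Char) (n offset : Nat) :
    innerLoopA s1 s2 n offset = (reVals 0 (diagScores s1 s2 n offset)).foldl max 0 := by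
  have hb : (List.range (n - offset)).foldl (fun (st : Int × Int) i =>
      let b1 := s1.getD i 'N'
      let b2 := s2.getD (n - 1 - i - offset) 'N'
      if (b1 = 'G' ∧ b2 = 'C') ∨ (b1 = 'C' ∧ b2 = 'G') then (st.1, st.2 + 4)
      else if (b1 = 'A' ∧ b2 = 'T') ∨ (b1 = 'T' ∧ b2 = 'A') then (st.1, st.2 + 2)
      else (if st.2 > st.1 then st.2 else st.1, 0)) ((0 : Int), (0 : Int))
      = (diagScores s1 s2 n offset).foldl stepA ((0 : Int), (0 : Int)) := by
    rw [diagScores, List.foldl_map]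
    congr 1
    funext st i
    exact step_char st _ _
  have hmem : ∀ x ∈ diagScores s1 s2 n offset, x = 0 ∨ x = 2 ∨ x = 4 := by
    intro x hx
    rw [diagScores] at hx
    obtain ⟨i, _, rfl⟩ := List.mem_map.mp hx
    exact pairScore_cases _ _
  have hnn : ∀ x ∈ diagScores s1 s2 n offset, (0:Int) ≤ x := by
    intro x hx; rcases hmem x hx with h | h | h <;> omega
  rw [innerLoopA]
  simp only [hb]
  rw [fold_stepA _ hmem 0 0, kadRuns_re _ hnn 0 le_rfl]
  have := le_foldl_max (reVals 0 (diagScores s1 s2 n offset)) 0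
  omega

lemma reVals_diag (s1 s2 : List Char) (n o : Nat) :
    ∀ (m start : Nat) (temp : Int), start + m ≤ n - o →
      (start = 0 → temp = 0) →
      (∀ k, start = k + 1 → temp = runEnd s1 s2 k (n - 1 - k - o)) →
      reVals temp ((List.range' start m).map (fun i => pairScoreB (s1.getD i 'N') (s2.getD (n - 1 - i - o) 'N')))
        = (List.range' start m).map (fun i => runEnd s1 s2 i (n - 1 - i - o)) := by
  intro m
  induction m with
  | zero => intro start temp _ _ _; simp [reVals]
  | succ m ih =>
    intro start temp hb h0 hs
    rw [List.range'_succ]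
    simp only [List.map_cons]
    rw [reVals]
    have hv : (if 0 < pairScoreB (s1.getD start 'N') (s2.getD (n - 1 - start - o) 'N') then
        temp + pairScoreB (s1.getD start 'N') (s2.getD (n - 1 - start - o) 'N') else 0)
        = runEnd s1 s2 start (n - 1 - start - o) := by
      cases start with
      | zero =>
        have h00 := h0 rfl
        subst h00
        show _ = (if pairScoreB (s1.getD 0 'N') (s2.getD (n - 1 - 0 - o) 'N') = 0 then 0
            else pairScoreB (s1.getD 0 'N') (s2.getD (n - 1 - 0 - o) 'N'))
        rcases pairScore_cases (s1.getD 0 'N') (s2.getD (n - 1 - 0 - o) 'N') with h | h | h <;>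
          rw [h] <;> norm_num
      | succ k =>
        have ht := hs k rfl
        have hj : n - 1 - (k + 1) - o + 1 = n - 1 - k - o := by omega
        show _ = (if pairScoreB (s1.getD (k+1) 'N') (s2.getD (n - 1 - (k+1) - o) 'N') = 0 then 0
            else pairScoreB (s1.getD (k+1) 'N') (s2.getD (n - 1 - (k+1) - o) 'N') + runEnd s1 s2 k (n - 1 - (k+1) - o + 1))
        rw [hj, ← ht]
        rcases pairScore_cases (s1.getD (k+1) 'N') (s2.getD (n - 1 - (k+1) - o) 'N') with h | h | h <;>
          rw [h] <;> norm_num <;> omega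
    simp only [hv]
    congr 1
    exact ih (start + 1) _ (by omega) (by omega) (fun k hk => by
      have : k = start := by omega
      subst this; rfl)

lemma diag_runEnd (s1 s2 : List Char) (n o : Nat) :
    reVals 0 (diagScores s1 s2 n o)
      = (List.range (n - o)).map (fun i => runEnd s1 s2 i (n - 1 - i - o)) := by
  rw [diagScores, List.range_eq_range']
  exact reVals_diag s1 s2 n o (n - o) 0 0 (by omega) (fun _ => rfl) (fun k hk => by omega)

-- nested fold of maxima = fold over the concatenation
lemma foldl_max_nest (g : Nat → List Int) : ∀ (l : List Nat) (acc : Int), 0 ≤ acc →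
    l.foldl (fun a o => max a ((g o).foldl max 0)) acc = (l.flatMap g).foldl max acc := by
  intro l
  induction l with
  | nil => intro acc _; simp
  | cons o l ih =>
    intro acc hacc
    simp only [List.foldl_cons, List.flatMap_cons, List.foldl_append]
    rw [← foldl_max_shift _ acc hacc]
    exact ih _ (le_trans hacc (le_foldl_max _ _))

-- B's inner row loop: computes the row values and folds max over them
lemma innerB (f : Nat → Int) : ∀ (l : List Nat) (b : Int) (c0 : List Int),
    l.foldl (fun (st2 : Int × List Int) j =>
        (if f j > st2.1 then f j else st2.1, st2.2 ++ [f j])) (b, c0)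
      = ((l.map f).foldl max b, c0 ++ l.map f) := by
  intro l
  induction l with
  | nil => intro b c0; simp
  | cons j l ih =>
    intro b c0
    simp only [List.foldl_cons, List.map_cons]
    rw [ih]
    have : (if f j > b then f j else b) = max b (f j) := by split_ifs <;> omega
    simp [this]

lemma getD_map_range (f : Nat → Int) (m t : Nat) (ht : t < m) :
    ((List.range m).map f).getD t 0 = f t := by
  rw [List.getD_eq_getElem _ _ (by simpa using ht)]
  simp

-- the v-formula of row i equals runEnd, given the prev invariant
lemma rowVals_eq (s1 s2 : List Char) (n i : Nat) (prev : List Int)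
    (h0 : i = 0 → prev = [])
    (hs : ∀ k, i = k + 1 → prev = (List.range (n - k)).map (fun j => runEnd s1 s2 k j)) :
    ∀ j < n - i,
      (if pairScoreB (s1.getD i 'N') (s2.getD j 'N') = 0 then 0
       else pairScoreB (s1.getD i 'N') (s2.getD j 'N') +
         (if j + 1 < prev.length then prev.getD (j + 1) 0 else 0))
      = runEnd s1 s2 i j := by
  intro j hj
  cases i with
  | zero =>
    have hp := h0 rfl
    subst hp
    rcases pairScore_cases (s1.getD 0 'N') (s2.getD j 'N') with h | h | h <;>
      rw [runEnd, h] <;> simp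
  | succ k =>
    have hp := hs k rfl
    subst hp
    have hjk : j + 1 < n - k := by omega
    have hcond : j + 1 < ((List.range (n - k)).map (fun j => runEnd s1 s2 k j)).length := by
      simpa using hjk
    rw [if_pos hcond, getD_map_range _ _ _ hjk, runEnd]

-- B's outer loop invariant
lemma outerB (s1 s2 : List Char) (n : Nat) :
    ∀ (m start : Nat) (b : Int) (prev : List Int), start + m ≤ n → 0 ≤ b →
      (start = 0 → prev = []) →
      (∀ k, start = k + 1 → prev = (List.range (n - k)).map (fun j => runEnd s1 s2 k j)) →
      ((List.range' start m).foldl (fun (st : Int × List Int) i =>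
          (List.range (n - i)).foldl (fun (st2 : Int × List Int) j =>
              let s := pairScoreB (s1.getD i 'N') (s2.getD j 'N')
              let v := if s = 0 then 0 else s + (if j + 1 < st.2.length then st.2.getD (j + 1) 0 else 0)
              (if v > st2.1 then v else st2.1, st2.2 ++ [v])) (st.1, ([] : List Int)))
        (b, prev)).1
      = ((List.range' start m).flatMap (fun i => (List.range (n - i)).map (fun j => runEnd s1 s2 i j))).foldl max b := by
  intro m
  induction m with
  | zero => intro start b prev _ _ _ _; simp
  | succ m ih =>
    intro start b prev hb hb0 hp0 hps
    rw [List.range'_succ]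
    simp only [List.foldl_cons, List.flatMap_cons, List.foldl_append]
    have hrow : (List.range (n - start)).foldl (fun (st2 : Int × List Int) j =>
        let s := pairScoreB (s1.getD start 'N') (s2.getD j 'N')
        let v := if s = 0 then 0 else s + (if j + 1 < prev.length then prev.getD (j + 1) 0 else 0)
        (if v > st2.1 then v else st2.1, st2.2 ++ [v])) (b, ([] : List Int))
        = (((List.range (n - start)).map (fun j => runEnd s1 s2 start j)).foldl max b,
           [] ++ (List.range (n - start)).map (fun j => runEnd s1 s2 start j)) := by
      have := innerB (fun j =>
        if pairScoreB (s1.getD start 'N') (s2.getD j 'N') = 0 then 0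
        else pairScoreB (s1.getD start 'N') (s2.getD j 'N') +
          (if j + 1 < prev.length then prev.getD (j + 1) 0 else 0)) (List.range (n - start)) b []
      rw [this]
      have hmcongr : (List.range (n - start)).map (fun j =>
          if pairScoreB (s1.getD start 'N') (s2.getD j 'N') = 0 then 0
          else pairScoreB (s1.getD start 'N') (s2.getD j 'N') +
            (if j + 1 < prev.length then prev.getD (j + 1) 0 else 0))
          = (List.range (n - start)).map (fun j => runEnd s1 s2 start j) := by
        apply List.map_congr_left
        intro j hj
        exact rowVals_eq s1 s2 n start prev hp0 hps j (List.mem_range.mp hj)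
      rw [hmcongr]
    rw [hrow]
    exact ih (start + 1) _ _ (by omega)
      (le_trans hb0 (le_foldl_max _ _))
      (by omega)
      (fun k hk => by
        have hks : k = start := by omega
        subst hks
        simp)

-- index lists of the triangle {(i, j) : i + j ≤ n - 1}, grouped by diagonal (A) and by row (B)
def idxA (n : Nat) : List (Nat × Nat) :=
  (List.range n).flatMap (fun o => (List.range (n - o)).map (fun i => (i, n - 1 - i - o)))

def idxB (n : Nat) : List (Nat × Nat) :=
  (List.range n).flatMap (fun i => (List.range (n - i)).map (fun j => (i, j)))

lemma nodup_flatMap_key {α β : Type} [DecidableEq β] (l : List α) (g : α → List β) (key : β → α)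
    (hnd : l.Nodup) (hg : ∀ a, (g a).Nodup) (hk : ∀ a ∈ l, ∀ b ∈ g a, key b = a) :
    (l.flatMap g).Nodup := by
  induction l with
  | nil => simp
  | cons a l ih =>
    simp only [List.flatMap_cons]
    rw [List.nodup_append]
    refine ⟨hg a, ih hnd.of_cons (fun a' ha' b hb => hk a' (List.mem_cons_of_mem _ ha') b hb), ?_⟩
    intro b hb c hc hbc
    obtain ⟨a', ha', hca'⟩ := List.mem_flatMap.mp hc
    have h1 : key b = a := hk a (List.mem_cons_self ..) b hb
    have h2 : key c = a' := hk a' (List.mem_cons_of_mem _ ha') c hca'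
    have hal : a ∉ l := (List.nodup_cons.mp hnd).1
    exact hal (by rw [(h1.symm.trans (hbc ▸ h2) : a = a')]; exact ha')

lemma idxA_nodup (n : Nat) : (idxA n).Nodup := by
  apply nodup_flatMap_key _ _ (fun p => n - 1 - p.1 - p.2) (List.nodup_range)
  · intro o
    exact List.Nodup.map (fun i i' h => by simpa using congrArg Prod.fst h) List.nodup_range
  · intro o ho p hp
    obtain ⟨i, hi, rfl⟩ := List.mem_map.mp hp
    have hi' := List.mem_range.mp hi
    have ho' := List.mem_range.mp ho
    simp only
    omega

lemma idxB_nodup (n : Nat) : (idxB n).Nodup := by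
  apply nodup_flatMap_key _ _ (fun p => p.1) (List.nodup_range)
  · intro i
    exact List.Nodup.map (fun j j' h => by simpa using congrArg Prod.snd h) List.nodup_range
  · intro i _ p hp
    obtain ⟨j, _, rfl⟩ := List.mem_map.mp hp
    rfl

lemma idx_perm (n : Nat) : (idxA n).Perm (idxB n) := by
  apply List.perm_of_nodup_nodup_toFinset_eq (idxA_nodup n) (idxB_nodup n)
  apply Finset.ext
  intro p
  simp only [List.mem_toFinset, idxA, idxB, List.mem_flatMap, List.mem_map, List.mem_range]
  constructor
  · rintro ⟨o, ho, i, hi, rfl⟩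
    exact ⟨i, by omega, n - 1 - i - o, by omega, rfl⟩
  · rintro ⟨i, hi, j, hj, rfl⟩
    exact ⟨n - 1 - i - j, by omega, i, by omega, by simp; omega⟩

lemma foldl_congr' {α β : Type} (l : List α) (f g : β → α → β)
    (h : ∀ b a, a ∈ l → f b a = g b a) : ∀ b, l.foldl f b = l.foldl g b := by
  induction l with
  | nil => intro b; rfl
  | cons x xs ih =>
    intro b
    simp only [List.foldl_cons]
    rw [h b x (List.mem_cons_self ..)]
    exact ih (fun b a ha => h b a (List.mem_cons_of_mem _ ha)) _

-- the common value: fold max over runEnd on the triangle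
lemma main_eq (s1 s2 : List Char) (n : Nat) :
    (List.range n).foldl (fun maxScore offset =>
        let cur := innerLoopA s1 s2 n offset
        if cur > maxScore then cur else maxScore) 0
    = ((List.range n).foldl (fun (st : Int × List Int) i =>
          (List.range (n - i)).foldl (fun (st2 : Int × List Int) j =>
              let s := pairScoreB (s1.getD i 'N') (s2.getD j 'N')
              let v := if s = 0 then 0 else s + (if j + 1 < st.2.length then st.2.getD (j + 1) 0 else 0)
              (if v > st2.1 then v else st2.1, st2.2 ++ [v])) (st.1, ([] : List Int)))
        ((0 : Int), ([] : List Int))).1 := by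
  -- A side
  have hA : (List.range n).foldl (fun maxScore offset =>
        let cur := innerLoopA s1 s2 n offset
        if cur > maxScore then cur else maxScore) 0
      = ((idxA n).map (fun p => runEnd s1 s2 p.1 p.2)).foldl max 0 := by
    have h1 : (List.range n).foldl (fun maxScore offset =>
          let cur := innerLoopA s1 s2 n offset
          if cur > maxScore then cur else maxScore) 0
        = (List.range n).foldl (fun a o =>
            max a (((List.range (n - o)).map (fun i => runEnd s1 s2 i (n - 1 - i - o))).foldl max 0)) 0 := by
      apply foldl_congr'
      intro a o ho
      simp only [inner_re, diag_runEnd s1 s2 n o]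
      split_ifs <;> omega
    rw [h1, foldl_max_nest _ _ 0 le_rfl]
    rw [idxA, List.map_flatMap]
    simp only [List.map_map]
    rfl
  -- B side
  have hB : ((List.range n).foldl (fun (st : Int × List Int) i =>
          (List.range (n - i)).foldl (fun (st2 : Int × List Int) j =>
              let s := pairScoreB (s1.getD i 'N') (s2.getD j 'N')
              let v := if s = 0 then 0 else s + (if j + 1 < st.2.length then st.2.getD (j + 1) 0 else 0)
              (if v > st2.1 then v else st2.1, st2.2 ++ [v])) (st.1, ([] : List Int)))
        ((0 : Int), ([] : List Int))).1
      = ((idxB n).map (fun p => runEnd s1 s2 p.1 p.2)).foldl max 0 := by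
    rw [List.range_eq_range']
    rw [outerB s1 s2 n n 0 0 [] (by omega) le_rfl (fun _ => rfl) (fun k hk => by omega)]
    rw [idxB, List.map_flatMap, List.range_eq_range']
    simp only [List.map_map]
    rfl
  rw [hA, hB]
  exact ((idx_perm n).map _).foldl_eq 0

-- ===== VERDICT (by name: the statement is the Claim_ definition above) =====
theorem calculate_annealing_py_spec : Claim_equal_calculate_annealing_py := by
  intro seq1 seq2 _
  unfold Spec_calculate_annealing_py calculate_annealing_py calculate_annealing_py_alt
  generalize PySem.Chars.upper seq1.toList = l1
  generalize PySem.Chars.upper seq2.toList = l2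
  simp only []
  rcases Nat.lt_trichotomy l1.length l2.length with h | h | h
  · have h1 : ((l1.length : Int) - (l2.length : Int) < 0) := by omega
    have h2 : ¬ (0 < (l1.length : Int) - (l2.length : Int)) := by omega
    have hn : ((l1.length : Int) - (l2.length : Int)).natAbs = l2.length - l1.length := by omega
    simp only [if_pos h1, if_neg h2, hn, if_pos h,
      if_neg (by simp [List.length_append, List.length_replicate]; omega :
        ¬ l2.length < (List.replicate (l2.length - l1.length) 'N' ++ l1).length)]
    exact main_eq _ _ _
  · have h1 : ¬ ((l1.length : Int) - (l2.length : Int) < 0) := by omega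
    have h2 : ¬ (0 < (l1.length : Int) - (l2.length : Int)) := by omega
    simp only [if_neg h1, if_neg h2, if_neg (by omega : ¬ l1.length < l2.length),
      if_neg (by omega : ¬ l2.length < l1.length)]
    exact main_eq _ _ _
  · have h1 : ¬ ((l1.length : Int) - (l2.length : Int) < 0) := by omega
    have h2 : (0 < (l1.length : Int) - (l2.length : Int)) := by omega
    have hn : ((l1.length : Int) - (l2.length : Int)).natAbs = l1.length - l2.length := by omega
    simp only [if_neg h1, if_pos h2, hn, if_neg (by omega : ¬ l1.length < l2.length),
      if_pos (by omega : l2.length < l1.length)]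
    exact main_eq _ _ _
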